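-- pv_equiv track=rewrite | github.com/devyen/algorithm-study | Programmers/Level1_문자열나누기.py | solution
-- ===== SOURCE A (Python) =====
-- def solution(s):
--     answer = 0
--     x = s[0]
--     cnt1 = cnt2 = 0
--     for i, ch in enumerate(s):
--         if ch == x:
--             cnt1 += 1
--         else:
--             cnt2 += 1
--         if cnt1 == cnt2:
--             answer += 1
--             cnt1 = cnt2 = 0
--             if i < len(s)-1:
--                 x = s[i+1]
--
--     if cnt1 > 0:
--         answer += 1
--
--     return answer
-- ===== SOURCE B (Python) =====
-- def solution(s):
--     # one iterator shared by both loops: the outer for picks each segment's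
--     # head, the inner for consumes the rest of that segment off the same
--     # iterator; the answer is the sum of 1 per segment yielded
--     def segments():
--         it = iter(s)
--         for x in it:
--             bal = 1
--             for ch in it:
--                 bal += 1 if ch == x else -1
--                 if bal == 0:
--                     break
--             yield 1
--     return sum(segments())
-- ===== Notes on version B (the rewrite author's own statement) =====
-- stated objective: alternative
-- what changed: B replaces A's indexed loop with mutable answer/cnt1/cnt2 state, counter resets and s[i+1] head reassignment by a generator over one iterator shared between two loops (outer picks each segment head, inner consumes that segment), summed with sum(); no indices, slices or counter pairs.
import Mathlib
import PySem

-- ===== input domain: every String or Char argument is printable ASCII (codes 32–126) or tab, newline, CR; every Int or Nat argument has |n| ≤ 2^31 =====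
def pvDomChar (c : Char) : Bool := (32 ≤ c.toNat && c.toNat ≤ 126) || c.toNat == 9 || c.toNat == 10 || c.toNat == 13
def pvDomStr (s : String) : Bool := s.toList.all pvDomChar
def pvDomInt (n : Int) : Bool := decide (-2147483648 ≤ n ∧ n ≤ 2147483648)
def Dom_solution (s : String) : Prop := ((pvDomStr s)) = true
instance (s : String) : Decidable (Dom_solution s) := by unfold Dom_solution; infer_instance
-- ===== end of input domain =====

-- B re-decomposes A's indexed accumulator loop as a generator over one iterator shared by
-- two loops (outer picks each segment head, inner consumes that segment), summed with sum();
-- alternative decomposition, same cost. A raises IndexError on "" (excluded by Pre_); B returns 0 there.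

-- ===== PORT A =====
-- A's for-loop as structural recursion over the remaining characters, carrying the loop
-- state (answer, cnt1, cnt2, x) and the enumerate index i; l is kept for s[i+1]/len(s).
def loopA (l : List Char) (i : Nat) (rem : List Char) (answer cnt1 cnt2 : Int) (x : Char) : Int :=
  match rem with
  | [] => if cnt1 > 0 then answer + 1 else answer
  | ch :: rest =>
    let cnt1' := if ch == x then cnt1 + 1 else cnt1
    let cnt2' := if ch == x then cnt2 else cnt2 + 1
    if cnt1' == cnt2' then
      loopA l (i+1) rest (answer+1) 0 0 (if i < l.length - 1 then l.getD (i+1) ' ' else x)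
    else
      loopA l (i+1) rest answer cnt1' cnt2' x

def solution (s : String) : Int :=
  let l := s.toList
  -- s[0]: raises IndexError on "" (excluded by Pre_solution); in-range thereafter
  let x := l.headD ' '
  loopA l 0 l 0 0 0 x

-- ===== PORT B =====
-- B's inner `for ch in it` with its break: consumes characters off the shared iterator
-- until bal hits 0, returning what is left of the iterator ([] if it is exhausted).
def consumeB (x : Char) (bal : Int) : List Char → List Char
  | [] => []
  | c :: rest =>
    let bal' := bal + (if c == x then 1 else -1)
    if bal' == 0 then rest else consumeB x bal' rest

theorem consumeB_length_le (x : Char) : ∀ (d : Int) (m : List Char),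
    (consumeB x d m).length ≤ m.length := by
  intro d m
  induction m generalizing d with
  | nil => simp [consumeB]
  | cons c rest ih =>
    simp only [consumeB]
    by_cases h0 : (d + (if c == x then 1 else -1) == 0) = true
    · rw [if_pos h0]; simp
    · rw [if_neg h0]; exact Nat.le_trans (ih _) (by simp)

-- B's generator summed by sum(): the outer `for x in it` as recursion on what the
-- shared iterator still holds; each pass yields 1 and continues after its segment.
def segLoop : List Char → Int
  | [] => 0
  | x :: tail => 1 + segLoop (consumeB x 1 tail)
termination_by l => l.length
decreasing_by
  exact Nat.lt_succ_of_le (consumeB_length_le x 1 tail)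

def solution_alt (s : String) : Int := segLoop s.toList

-- ===== PRECONDITION & SPEC =====
-- Pre_ excludes only "", on which A raises IndexError at s[0] (B returns 0 there).
def Pre_solution (s : String) : Prop := s ≠ ""
instance (s : String) : Decidable (Pre_solution s) := by unfold Pre_solution; infer_instance
def pvWitness_solution : String := "banana"

def Spec_solution (s : String) (out : Int) : Prop := out = solution_alt s
instance (s : String) (out : Int) : Decidable (Spec_solution s out) := by unfold Spec_solution; infer_instance

-- ===== CLAIM (what is proved, stated in full; the proofs are below) =====
def Claim_equal_solution : Prop := ∀ (s : String), Dom_solution s → Pre_solution s → Spec_solution s (solution s)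

-- ===== LEMMAS AND PROOFS =====

theorem getD_eq_headD_drop (l : List Char) (i : Nat) (d : Char) :
    l.getD i d = (l.drop i).headD d := by
  induction l generalizing i with
  | nil => simp
  | cons c rest ih =>
    cases i with
    | zero => simp
    | succ j => simpa using ih j

theorem drop_cons {l rem : List Char} {i : Nat} {c : Char} (h : l.drop i = c :: rem) :
    l.drop (i+1) = rem := by
  have h2 : List.drop 1 (List.drop i l) = List.drop 1 (c :: rem) := by rw [h]
  rw [List.drop_drop] at h2
  simpa [Nat.add_comm] using h2

theorem length_drop_of_eq {l rem : List Char} {i : Nat} (h : l.drop i = rem)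
    (hle : i ≤ l.length) : i = l.length - rem.length := by
  have := congrArg List.length h
  simp [List.length_drop] at this
  omega

theorem consumeB_drop {x : Char} {d : Int} : ∀ {m r : List Char},
    consumeB x d m = r → r ≠ [] → ∃ k, m.drop (k+1) = r := by
  intro m
  induction m generalizing d with
  | nil =>
    intro r h hne
    simp only [consumeB] at h
    exact absurd h.symm hne
  | cons c rest ih =>
    intro r h hne
    simp only [consumeB] at h
    by_cases h0 : (d + (if c == x then 1 else -1) == 0) = true
    · rw [if_pos h0] at h; exact ⟨0, by simpa using h⟩
    · rw [if_neg h0] at h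
      obtain ⟨k, hk⟩ := ih h hne
      exact ⟨k+1, by simpa using hk⟩

-- Mid-segment: A's loop with cnt2 < cnt1 behaves as B's inner consumption of the shared
-- iterator with bal = cnt1 - cnt2; an empty leftover closes out with answer + 1.
theorem inner (l : List Char) : ∀ (rem : List Char) (i : Nat) (answer cnt1 cnt2 : Int) (x : Char),
    l.drop i = rem → 0 ≤ cnt2 → cnt2 < cnt1 →
    loopA l i rem answer cnt1 cnt2 x =
      (if consumeB x (cnt1 - cnt2) rem = [] then answer + 1
       else loopA l (l.length - (consumeB x (cnt1 - cnt2) rem).length)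
              (consumeB x (cnt1 - cnt2) rem) (answer+1) 0 0 ((consumeB x (cnt1 - cnt2) rem).headD ' ')) := by
  intro rem
  induction rem with
  | nil =>
    intro i answer cnt1 cnt2 x hdrop h2 h12
    simp only [consumeB, loopA]
    have : cnt1 > 0 := by omega
    simp [this]
  | cons ch rest ih =>
    intro i answer cnt1 cnt2 x hdrop h2 h12
    have hile : i ≤ l.length := by
      by_contra hnle
      have : l.drop i = [] := List.drop_eq_nil_of_le (by omega)
      rw [this] at hdrop; exact absurd hdrop (by simp)
    have hrest : l.drop (i+1) = rest := drop_cons hdrop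
    simp only [loopA, consumeB]
    by_cases hch : ch = x
    · -- match: cnt1+1 vs cnt2; bal goes up, never 0 here
      have hne : ¬ ((cnt1 + 1) == cnt2) = true := by simp; omega
      have hne' : ¬ ((cnt1 - cnt2 + 1) == 0) = true := by simp; omega
      simp only [hch, beq_self_eq_true, if_true, hne, hne', if_neg]
      have := ih (i+1) answer (cnt1+1) cnt2 x hrest h2 (by omega)
      rw [show cnt1 + 1 - cnt2 = cnt1 - cnt2 + 1 by ring] at this
      simpa [hne, hne'] using this
    · have hbeq : (ch == x) = false := by simp [hch]
      simp only [hbeq, if_false, Bool.false_eq_true]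
      by_cases heq : cnt1 = cnt2 + 1
      · -- segment closes here: A takes the cnt1' == cnt2' branch, B's bal hits 0
        have h1 : (cnt1 == cnt2 + 1) = true := by simp [heq]
        have h0 : (cnt1 - cnt2 + -1 == 0) = true := by simp; omega
        simp only [h1, if_true, h0]
        cases hr : rest with
        | nil =>
          simp only [loopA]
          simp
        | cons r0 rtail =>
          have hrne : rest ≠ [] := by simp [hr]
          have hlen : i + 1 < l.length := by
            have := congrArg List.length hrest
            simp [List.length_drop] at this
            rw [hr] at this; simp at this; omega
          have hguard : i < l.length - 1 := by omega
          have hidx : i + 1 = l.length - rest.length :=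
            length_drop_of_eq hrest (by omega)
          have hx : l.getD (i+1) ' ' = rest.headD ' ' := by
            rw [getD_eq_headD_drop, hrest]
          rw [← hr]
          simp only [if_pos hguard, hx, if_neg hrne, ← hidx]
      · have h1 : ¬ (cnt1 == cnt2 + 1) = true := by simp; omega
        have h0 : ¬ (cnt1 - cnt2 + -1 == 0) = true := by simp; omega
        simp only [h1, h0, if_neg]
        have := ih (i+1) answer cnt1 (cnt2+1) x hrest (by omega) (by omega)
        rw [show cnt1 - (cnt2 + 1) = cnt1 - cnt2 + -1 by ring] at this
        simpa [h1, h0] using this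

-- Segment start: A's loop on a suffix with fresh counters equals answer + B's generator sum.
theorem outer (l : List Char) : ∀ (n : Nat) (rem : List Char) (i : Nat) (answer : Int),
    rem.length ≤ n → l.drop i = rem → rem ≠ [] →
    loopA l i rem answer 0 0 (rem.headD ' ') = answer + segLoop rem := by
  intro n
  induction n with
  | zero =>
    intro rem i answer hlen hdrop hne
    cases rem with
    | nil => exact absurd rfl hne
    | cons c r => simp at hlen
  | succ n ih =>
    intro rem i answer hlen hdrop hne
    cases rem with
    | nil => exact absurd rfl hne
    | cons x0 tail =>
      have hrest : l.drop (i+1) = tail := drop_cons hdrop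
      -- first iteration: ch = x0 = x, cnt1 := 1, 1 ≠ 0
      simp only [List.headD, loopA, beq_self_eq_true, if_true]
      norm_num
      have hin := inner l tail (i+1) answer 1 0 x0 hrest (le_refl 0) (by omega)
      norm_num at hin
      rw [hin, segLoop]
      cases hcon : consumeB x0 1 tail with
      | nil => simp [segLoop]
      | cons r0 rtail =>
        simp only [if_neg (by simp : ¬ (r0 :: rtail = []))]
        obtain ⟨k, hk⟩ := consumeB_drop hcon (by simp)
        have hdropr : l.drop (i + 1 + (k+1)) = r0 :: rtail := by
          rw [← hk, ← hrest, List.drop_drop]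
        have hklen : i + 1 + (k+1) ≤ l.length := by
          by_contra hc
          have : l.drop (i+1+(k+1)) = [] := List.drop_eq_nil_of_le (by omega)
          rw [hdropr] at this; exact absurd this (by simp)
        have hidx : i + 1 + (k+1) = l.length - (r0 :: rtail).length :=
          length_drop_of_eq hdropr hklen
        have hout := ih (r0 :: rtail) (i+1+(k+1)) (answer+1)
          (by
            have hle := consumeB_length_le x0 1 tail
            rw [hcon] at hle
            have : tail.length ≤ n := by simpa using hlen
            simp at hle ⊢; omega)
          hdropr (by simp)
        simp only [List.headD_cons] at hout
        simp only [List.head?_cons, Option.getD_some, ← hidx]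
        rw [hout]; ring

theorem toList_ne_nil {s : String} (h : s ≠ "") : s.toList ≠ [] := by
  intro hnil
  apply h
  have h2 := congrArg String.ofList hnil
  rw [String.ofList_toList] at h2
  simpa using h2

-- ===== VERDICT (by name: the statement is the Claim_ definition above) =====
theorem solution_spec : Claim_equal_solution := by
  intro s _ hpre
  unfold Spec_solution solution solution_alt
  have hne : s.toList ≠ [] := toList_ne_nil hpre
  have := outer s.toList s.toList.length s.toList 0 0 (le_refl _) (by simp) hne
  simpa using this
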